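-- pv_equiv track=rewrite | github.com/min-soo-choi/ai- | app.py | _json_diff_keys
-- ===== SOURCE A (Python) =====
-- def _json_diff_keys(raw: dict | None, final: dict | None) -> list[str]:
--     if not isinstance(raw, dict):
--         raw = {}
--     if not isinstance(final, dict):
--         final = {}
--     keys = []
--     for key in sorted(set(raw.keys()) | set(final.keys())):
--         if raw.get(key, "<없음>") != final.get(key, "<없음>"):
--             keys.append(key)
--     return keys
-- ===== SOURCE B (Python) =====
-- def _json_diff_keys(raw: dict | None, final: dict | None) -> list[str]:
--     if not isinstance(raw, dict):
--         raw = {}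
--     if not isinstance(final, dict):
--         final = {}
--     raw_keys = set(raw)
--     final_keys = set(final)
--     result = [k for k in raw_keys & final_keys if raw[k] != final[k]]
--     result += [k for k in raw_keys - final_keys if raw[k] != "<없음>"]
--     result += [k for k in final_keys - raw_keys if final[k] != "<없음>"]
--     return sorted(result)
-- ===== Notes on version B (the rewrite author's own statement) =====
-- stated objective: alternative
-- what changed: Instead of scanning the sorted union with defaulted lookups, B splits the keys once into intersection and the two one-sided differences, filters each set with direct indexing (one-sided keys compared against the sentinel), concatenates and sorts the result.
import Mathlib
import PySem

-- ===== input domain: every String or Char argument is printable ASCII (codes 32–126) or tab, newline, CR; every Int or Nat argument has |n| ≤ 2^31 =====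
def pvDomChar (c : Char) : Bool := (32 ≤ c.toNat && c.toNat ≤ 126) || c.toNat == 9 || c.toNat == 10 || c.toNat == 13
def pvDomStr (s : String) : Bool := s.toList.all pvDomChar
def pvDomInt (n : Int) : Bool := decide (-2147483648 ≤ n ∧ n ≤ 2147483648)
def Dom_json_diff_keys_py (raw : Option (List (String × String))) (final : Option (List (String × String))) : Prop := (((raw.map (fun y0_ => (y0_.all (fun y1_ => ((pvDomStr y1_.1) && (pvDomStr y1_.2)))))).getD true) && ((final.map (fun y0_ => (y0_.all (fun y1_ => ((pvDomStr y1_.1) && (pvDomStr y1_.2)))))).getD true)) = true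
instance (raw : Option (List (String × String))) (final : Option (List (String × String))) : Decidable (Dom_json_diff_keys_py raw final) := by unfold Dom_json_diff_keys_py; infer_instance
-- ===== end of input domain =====

-- B replaces A's scan of the sorted key union (with sentinel-defaulted lookups) by filtering the
-- key intersection and the two one-sided key differences separately, then sorting the collected
-- keys; same O(n log n) cost, different decomposition ("alternative").

-- ===== PORT A =====
def json_diff_keys_py (raw : Option (List (String × String))) (final : Option (List (String × String))) : List String :=
  -- 'if not isinstance(raw, dict): raw = {}' — None becomes the empty dict
  let rawD : PySem.Dict String String := PySem.Dict.ofList (raw.getD [])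
  let finalD : PySem.Dict String String := PySem.Dict.ofList (final.getD [])
  let ks : List String :=
    PySem.List.sorted
      (PySem.Set.union (PySem.Set.ofList (PySem.Dict.keys rawD)) (PySem.Set.ofList (PySem.Dict.keys finalD)))
      (fun k => k) false
  ks.foldl (fun keys key =>
    if PySem.Dict.getD rawD key "<없음>" ≠ PySem.Dict.getD finalD key "<없음>" then keys ++ [key]
    else keys) []

-- ===== PORT B =====
def json_diff_keys_py_alt (raw : Option (List (String × String))) (final : Option (List (String × String))) : List String :=
  let rawD : PySem.Dict String String := PySem.Dict.ofList (raw.getD [])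
  let finalD : PySem.Dict String String := PySem.Dict.ofList (final.getD [])
  let rk : PySem.Set String := PySem.Set.ofList (PySem.Dict.keys rawD)
  let fk : PySem.Set String := PySem.Set.ofList (PySem.Dict.keys finalD)
  -- raw[k] / final[k]: the key is guaranteed present in each comprehension, so the total
  -- getD form (default never used) is exact here
  let result : List String :=
    (PySem.Set.inter rk fk).filter
        (fun k => PySem.Dict.getD rawD k "" ≠ PySem.Dict.getD finalD k "")
    ++ (PySem.Set.diff rk fk).filter (fun k => PySem.Dict.getD rawD k "" ≠ "<없음>")
    ++ (PySem.Set.diff fk rk).filter (fun k => PySem.Dict.getD finalD k "" ≠ "<없음>")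
  PySem.List.sorted result (fun k => k) false

-- ===== PRECONDITION & SPEC =====
def Spec_json_diff_keys_py (raw : Option (List (String × String))) (final : Option (List (String × String))) (out : List String) : Prop := out = json_diff_keys_py_alt raw final
instance (raw : Option (List (String × String))) (final : Option (List (String × String))) (out : List String) : Decidable (Spec_json_diff_keys_py raw final out) := by unfold Spec_json_diff_keys_py; infer_instance

-- ===== CLAIM (what is proved, stated in full; the proofs are below) =====
def Claim_equal_json_diff_keys_py : Prop := ∀ (raw : Option (List (String × String))) (final : Option (List (String × String))), Dom_json_diff_keys_py raw final → Spec_json_diff_keys_py raw final (json_diff_keys_py raw final)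

-- ===== LEMMAS AND PROOFS =====

-- getD does not depend on the default when the key is present
theorem getD_indep (f : PySem.Dict String String) (k : String) (s t : String)
    (h : f.contains k = true) : f.getD k s = f.getD k t := by
  rw [PySem.Dict.getD_eq_get?_getD, PySem.Dict.getD_eq_get?_getD,
      PySem.Dict.contains_eq_isSome_get?] at *
  cases hv : f.get? k with
  | none => rw [hv] at h; simp at h
  | some v => simp

-- The dict-level core: A's filtered sorted union equals B's sorted three-way split.
theorem json_diff_keys_core (d e : PySem.Dict String String) :
    (PySem.List.sorted
        (PySem.Set.union (PySem.Set.ofList (PySem.Dict.keys d)) (PySem.Set.ofList (PySem.Dict.keys e)))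
        (fun k => k) false).foldl (fun keys key =>
          if PySem.Dict.getD d key "<없음>" ≠ PySem.Dict.getD e key "<없음>" then keys ++ [key]
          else keys) []
    = PySem.List.sorted
        ((PySem.Set.inter (PySem.Set.ofList (PySem.Dict.keys d)) (PySem.Set.ofList (PySem.Dict.keys e))).filter
            (fun k => PySem.Dict.getD d k "" ≠ PySem.Dict.getD e k "")
         ++ (PySem.Set.diff (PySem.Set.ofList (PySem.Dict.keys d)) (PySem.Set.ofList (PySem.Dict.keys e))).filter
            (fun k => PySem.Dict.getD d k "" ≠ "<없음>")
         ++ (PySem.Set.diff (PySem.Set.ofList (PySem.Dict.keys e)) (PySem.Set.ofList (PySem.Dict.keys d))).filter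
            (fun k => PySem.Dict.getD e k "" ≠ "<없음>"))
        (fun k => k) false := by
  rw [PySem.List.foldl_append_ite_eq_filter, List.nil_append]
  set rk : PySem.Set String := PySem.Set.ofList (PySem.Dict.keys d) with hrkdef
  set fk : PySem.Set String := PySem.Set.ofList (PySem.Dict.keys e) with hfkdef
  have hrk : rk.Nodup := PySem.Set.nodup_ofList _
  have hfk : fk.Nodup := PySem.Set.nodup_ofList _
  have hU : (PySem.Set.union rk fk).Nodup := PySem.Set.nodup_union _ _ hrk
  have hcd : ∀ k, k ∈ rk → d.contains k = true := by
    intro k hk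
    rw [PySem.Dict.contains_iff_mem_keys]
    rw [hrkdef] at hk
    exact (PySem.Set.mem_ofList _ _).mp hk
  have hce : ∀ k, k ∈ fk → e.contains k = true := by
    intro k hk
    rw [PySem.Dict.contains_iff_mem_keys]
    rw [hfkdef] at hk
    exact (PySem.Set.mem_ofList _ _).mp hk
  have hcd' : ∀ k, k ∉ rk → d.contains k = false := by
    intro k hk
    cases hb : d.contains k with
    | false => rfl
    | true =>
      exact absurd ((PySem.Set.mem_ofList _ _).mpr ((PySem.Dict.contains_iff_mem_keys _ _).mp hb)) hk
  have hce' : ∀ k, k ∉ fk → e.contains k = false := by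
    intro k hk
    cases hb : e.contains k with
    | false => rfl
    | true =>
      exact absurd ((PySem.Set.mem_ofList _ _).mpr ((PySem.Dict.contains_iff_mem_keys _ _).mp hb)) hk
  -- the three B-side filters agree with A's predicate on their key sets
  have h1 : (PySem.Set.inter rk fk).filter (fun k => PySem.Dict.getD d k "" ≠ PySem.Dict.getD e k "")
      = (PySem.Set.inter rk fk).filter (fun k => decide (PySem.Dict.getD d k "<없음>" ≠ PySem.Dict.getD e k "<없음>")) := by
    apply List.filter_congr
    intro k hk
    obtain ⟨h₁, h₂⟩ := (PySem.Set.mem_inter _ _ _).mp hk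
    simp [getD_indep d k "" "<없음>" (hcd k h₁), getD_indep e k "" "<없음>" (hce k h₂)]
  have h2 : (PySem.Set.diff rk fk).filter (fun k => PySem.Dict.getD d k "" ≠ "<없음>")
      = (PySem.Set.diff rk fk).filter (fun k => decide (PySem.Dict.getD d k "<없음>" ≠ PySem.Dict.getD e k "<없음>")) := by
    apply List.filter_congr
    intro k hk
    obtain ⟨h₁, h₂⟩ := (PySem.Set.mem_diff _ _ _).mp hk
    simp [getD_indep d k "" "<없음>" (hcd k h₁), PySem.Dict.getD_of_not_contains e _ (hce' k h₂)]
  have h3 : (PySem.Set.diff fk rk).filter (fun k => PySem.Dict.getD e k "" ≠ "<없음>")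
      = (PySem.Set.diff fk rk).filter (fun k => decide (PySem.Dict.getD d k "<없음>" ≠ PySem.Dict.getD e k "<없음>")) := by
    apply List.filter_congr
    intro k hk
    obtain ⟨h₁, h₂⟩ := (PySem.Set.mem_diff _ _ _).mp hk
    simp [getD_indep e k "" "<없음>" (hce k h₁), PySem.Dict.getD_of_not_contains d _ (hcd' k h₂)]
    tauto
  rw [h1, h2, h3, ← List.filter_append, ← List.filter_append]
  -- the three-way split is a permutation of the key union
  have hnod3 : (PySem.Set.inter rk fk ++ PySem.Set.diff rk fk ++ PySem.Set.diff fk rk).Nodup := by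
    refine ((PySem.Set.nodup_inter rk fk hrk).append (PySem.Set.nodup_diff rk fk hrk) ?_).append
      (PySem.Set.nodup_diff fk rk hfk) ?_
    · intro a ha hb
      have := (PySem.Set.mem_inter _ _ _).mp ha
      have := (PySem.Set.mem_diff _ _ _).mp hb
      tauto
    · intro a ha hb
      have hb' := (PySem.Set.mem_diff _ _ _).mp hb
      rcases List.mem_append.mp ha with h | h
      · have := (PySem.Set.mem_inter _ _ _).mp h; tauto
      · have := (PySem.Set.mem_diff _ _ _).mp h; tauto
  have hperm3 : (PySem.Set.inter rk fk ++ PySem.Set.diff rk fk ++ PySem.Set.diff fk rk).Perm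
      (PySem.Set.union rk fk) := by
    rw [List.perm_ext_iff_of_nodup hnod3 hU]
    intro a
    simp only [List.mem_append, PySem.Set.mem_inter, PySem.Set.mem_diff, PySem.Set.mem_union]
    tauto
  -- A's output is a strictly increasing permutation of the collected keys, hence their sort
  have hnds : (PySem.List.sorted (PySem.Set.union rk fk) (fun k => k) false).Nodup :=
    ((PySem.List.sorted_perm _ _ false).nodup_iff).mpr hU
  have hlt : (PySem.List.sorted (PySem.Set.union rk fk) (fun k => k) false).Pairwise
      (fun a b => a < b) :=
    ((PySem.List.sorted_pairwise _ _).and hnds).imp (fun h => lt_of_le_of_ne h.1 h.2)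
  exact (PySem.List.sorted_eq_of_perm_of_pairwise_lt _ _ _
    (((PySem.List.sorted_perm _ _ false).filter _).trans (hperm3.symm.filter _))
    (hlt.filter _)).symm

theorem json_diff_keys_py_spec : Claim_equal_json_diff_keys_py := by
  intro raw final _
  show json_diff_keys_py raw final = json_diff_keys_py_alt raw final
  simpa [json_diff_keys_py, json_diff_keys_py_alt] using
    json_diff_keys_core (PySem.Dict.ofList (raw.getD [])) (PySem.Dict.ofList (final.getD []))
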